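-- pv_equiv track=rewrite | github.com/marleenlukei/SMARTLAB-Unit_1 | preprocessing.py | extract_content_features
-- ===== SOURCE A (Python) =====
-- def extract_content_features(content_dict):
--     content_types = {'text/plain': 0, 'text/html': 0, 'application/pgp-signature': 0,
--                      'image/gif': 0, 'image/jpeg': 0, 'Attachment': 0,
--                      'application/octet-stream': 0, 'text/plain charset=us-ascii': 0,
--                      'text/x-patch': 0, 'text/x-diff': 0, 'application/x-gzip': 0,
--                      'image/png': 0, 'application/pdf': 0, 'plain/text': 0,
--                      'text/html': 0, 'text/plain': 0, 'image/gif': 0,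
--                      'image/jpeg': 0, 'image/png': 0, 'Attachment': 0,
--                      'application/x-msdownload': 0, 'text/rfc822-headers': 0,
--                      'image/jpg': 0, 'multipart/alternative': 0}
--     for key in content_dict.keys():
--         if key in content_types:
--             content_types[key] = 1  # Presence of this content type
--     return list(content_types.values())
-- ===== SOURCE B (Python) =====
-- TYPES = ['text/plain', 'text/html', 'application/pgp-signature', 'image/gif',
--          'image/jpeg', 'Attachment', 'application/octet-stream',
--          'text/plain charset=us-ascii', 'text/x-patch', 'text/x-diff',
--          'application/x-gzip', 'image/png', 'application/pdf', 'plain/text',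
--          'application/x-msdownload', 'text/rfc822-headers', 'image/jpg',
--          'multipart/alternative']
--
-- def extract_content_features(content_dict):
--     return [1 if t in content_dict else 0 for t in TYPES]
-- ===== Notes on version B (the rewrite author's own statement) =====
-- stated objective: idiomatic
-- what changed: B hardcodes the 18 distinct known content types in first-appearance order and probes the input dict for each with a membership test, instead of building a mutable flag dict and looping over the input's keys to set flags.
import Mathlib
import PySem

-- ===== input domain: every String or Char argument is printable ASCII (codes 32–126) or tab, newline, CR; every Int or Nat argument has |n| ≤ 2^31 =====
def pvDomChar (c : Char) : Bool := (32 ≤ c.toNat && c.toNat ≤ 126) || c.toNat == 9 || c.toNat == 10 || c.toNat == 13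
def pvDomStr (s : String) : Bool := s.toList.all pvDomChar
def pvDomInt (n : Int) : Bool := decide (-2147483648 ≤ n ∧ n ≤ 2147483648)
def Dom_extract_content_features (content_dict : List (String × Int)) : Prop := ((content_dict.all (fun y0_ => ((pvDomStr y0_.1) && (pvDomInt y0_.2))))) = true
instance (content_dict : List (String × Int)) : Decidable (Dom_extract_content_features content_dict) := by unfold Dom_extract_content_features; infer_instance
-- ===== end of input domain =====

-- B replaces A's mutable flag dict updated while looping over the input's keys by a
-- membership probe of the input for each of the 18 distinct known types (idiomatic).

-- ===== PORT A =====
-- the literal dict initialiser of A (24 entries; Python collapses duplicates on the fly)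
def pvInitDict : PySem.Dict String Int :=
  PySem.Dict.ofList [("text/plain", 0), ("text/html", 0), ("application/pgp-signature", 0),
    ("image/gif", 0), ("image/jpeg", 0), ("Attachment", 0),
    ("application/octet-stream", 0), ("text/plain charset=us-ascii", 0),
    ("text/x-patch", 0), ("text/x-diff", 0), ("application/x-gzip", 0),
    ("image/png", 0), ("application/pdf", 0), ("plain/text", 0),
    ("text/html", 0), ("text/plain", 0), ("image/gif", 0),
    ("image/jpeg", 0), ("image/png", 0), ("Attachment", 0),
    ("application/x-msdownload", 0), ("text/rfc822-headers", 0),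
    ("image/jpg", 0), ("multipart/alternative", 0)]

def extract_content_features (content_dict : List (String × Int)) : List Int :=
  let content_types :=
    (content_dict.map (·.1)).foldl
      (fun d key => if d.contains key then d.insert key 1 else d) pvInitDict
  content_types.values

-- ===== PORT B =====
def pvTYPES : List String :=
  ["text/plain", "text/html", "application/pgp-signature", "image/gif",
   "image/jpeg", "Attachment", "application/octet-stream",
   "text/plain charset=us-ascii", "text/x-patch", "text/x-diff",
   "application/x-gzip", "image/png", "application/pdf", "plain/text",
   "application/x-msdownload", "text/rfc822-headers", "image/jpg",
   "multipart/alternative"]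

def extract_content_features_alt (content_dict : List (String × Int)) : List Int :=
  pvTYPES.map (fun t => if (content_dict.map (·.1)).contains t then 1 else 0)

-- ===== PRECONDITION & SPEC =====
def Spec_extract_content_features (content_dict : List (String × Int)) (out : List Int) : Prop := out = extract_content_features_alt content_dict
instance (content_dict : List (String × Int)) (out : List Int) : Decidable (Spec_extract_content_features content_dict out) := by unfold Spec_extract_content_features; infer_instance

-- ===== CLAIM (what is proved, stated in full; the proofs are below) =====
def Claim_equal_extract_content_features : Prop := ∀ (content_dict : List (String × Int)), Dom_extract_content_features content_dict → Spec_extract_content_features content_dict (extract_content_features content_dict)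

-- ===== LEMMAS AND PROOFS =====

-- A's loop never changes the key list, and after the loop a key holds 1 exactly when it
-- was in the dict and appeared among the processed keys.
theorem pv_loop_keys (ks : List String) (d : PySem.Dict String Int) :
    (ks.foldl (fun d key => if d.contains key then d.insert key 1 else d) d).keys = d.keys := by
  induction ks generalizing d with
  | nil => rfl
  | cons k ks ih =>
    simp only [List.foldl_cons]
    rw [ih]
    by_cases h : d.contains k
    · simp only [h, if_true, PySem.Dict.keys_insert_of_contains _ 1 h]
    · simp [h]

theorem pv_loop_getD (ks : List String) (d : PySem.Dict String Int) (t : String) :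
    (ks.foldl (fun d key => if d.contains key then d.insert key 1 else d) d).getD t 0
      = if d.contains t = true ∧ t ∈ ks then 1 else d.getD t 0 := by
  induction ks generalizing d with
  | nil => simp
  | cons k ks ih =>
    simp only [List.foldl_cons]
    rw [ih]
    have hc : (if d.contains k = true then d.insert k 1 else d).contains t = d.contains t := by
      by_cases h : d.contains k
      · simp only [h, if_true, PySem.Dict.contains_insert]
        by_cases ht : t = k
        · subst ht; simp [h]
        · simp [ht]
      · simp [h]
    rw [hc]
    by_cases hdt : d.contains t
    · by_cases htk : t = k
      · subst htk
        simp [hdt]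
      · by_cases hks : t ∈ ks
        · simp [hdt, hks, htk]
        · by_cases hdk : d.contains k
          · simp [hdt, hks, htk, hdk, PySem.Dict.getD_insert]
          · simp [hdt, hks, htk, hdk]
    · by_cases hdk : d.contains k
      · simp only [hdk, if_true]
        have htk : t ≠ k := by rintro rfl; rw [hdk] at hdt; exact hdt rfl
        simp [hdt, PySem.Dict.getD_insert, htk]
      · simp [hdt, hdk]

theorem pv_init_keys : pvInitDict.keys = pvTYPES := by decide

theorem pv_init_nodup : pvInitDict.keys.Nodup := by decide


theorem pv_init_getD (t : String) : pvInitDict.getD t 0 = 0 := by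
  have hz : ∀ p ∈ pvInitDict.items, p.2 = 0 := by decide
  rw [PySem.Dict.getD_eq_get?_getD]
  cases h : pvInitDict.get? t with
  | none => rfl
  | some v => exact hz _ (PySem.Dict.mem_items_of_get?_eq_some _ h)

theorem pv_init_contains (t : String) (h : t ∈ pvTYPES) : pvInitDict.contains t = true := by
  rw [PySem.Dict.contains_iff_mem_keys, pv_init_keys]
  exact h

-- ===== VERDICT (by name: the statement is the Claim_ definition above) =====
theorem extract_content_features_spec : Claim_equal_extract_content_features := by
  intro cd _
  unfold Spec_extract_content_features extract_content_features extract_content_features_alt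
  set ks := cd.map (·.1) with hks
  set d1 := ks.foldl (fun d key => if d.contains key then d.insert key 1 else d) pvInitDict with hd1
  have hkeys : d1.keys = pvTYPES := by rw [hd1, pv_loop_keys, pv_init_keys]
  have hnd : d1.keys.Nodup := by rw [hkeys, ← pv_init_keys]; exact pv_init_nodup
  rw [PySem.Dict.values_eq_map_keys d1 hnd 0, hkeys]
  refine List.map_congr_left (fun t ht => ?_)
  rw [hd1, pv_loop_getD, pv_init_getD, pv_init_contains t ht]
  by_cases h : t ∈ ks
  · simp [h]
  · simp [h]
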